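-- pv_equiv track=rewrite | github.com/Userbash/latency-monitor | python/server.py | select_pass_targets
-- ===== SOURCE A (Python) =====
-- from typing import Any, Dict, List
--
-- def select_pass_targets(pool: List[str], pass_index: int, pass_size: int = 3) -> List[str]:
--     if not pool:
--         return []
--
--     offset = (pass_index * pass_size) % len(pool)
--     targets = []
--     for i in range(min(pass_size, len(pool))):
--         targets.append(pool[(offset + i) % len(pool)])
--     return targets
-- ===== SOURCE B (Python) =====
-- def select_pass_targets(pool, pass_index, pass_size=3):
--     if not pool:
--         return []
--     count = min(pass_size, len(pool))
--     if count <= 0: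
--         return []
--     offset = (pass_index * pass_size) % len(pool)
--     first = pool[offset:offset + count]
--     if len(first) < count:
--         first = first + pool[:count - len(first)]
--     return first
-- ===== Notes on version B (the rewrite author's own statement) =====
-- stated objective: idiomatic
-- what changed: Replaces the element-by-element loop with modulo indexing by two bulk contiguous slices (window after the offset, plus the wrapped prefix when the window wraps).
import Mathlib
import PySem

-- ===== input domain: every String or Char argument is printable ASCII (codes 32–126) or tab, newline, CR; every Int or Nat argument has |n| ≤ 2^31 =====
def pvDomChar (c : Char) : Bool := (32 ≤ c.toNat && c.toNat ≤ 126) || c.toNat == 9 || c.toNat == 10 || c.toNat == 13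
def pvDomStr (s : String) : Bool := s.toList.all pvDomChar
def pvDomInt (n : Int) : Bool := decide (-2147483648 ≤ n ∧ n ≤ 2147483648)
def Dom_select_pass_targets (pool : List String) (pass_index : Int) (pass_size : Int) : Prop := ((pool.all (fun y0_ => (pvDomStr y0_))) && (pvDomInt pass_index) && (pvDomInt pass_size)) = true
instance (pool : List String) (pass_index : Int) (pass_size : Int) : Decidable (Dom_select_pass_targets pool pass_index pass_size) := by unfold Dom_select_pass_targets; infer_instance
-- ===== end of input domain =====

-- B replaces A's element-by-element modulo-indexed loop by two bulk contiguous slices (idiomatic; same cost).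

-- ===== PORT A =====
-- pool[(offset + i) % len(pool)] is always in range (the index is a non-negative mod), so
-- pyGetD with a dummy default "" is exact here.
def select_pass_targets (pool : List String) (pass_index : Int) (pass_size : Int) : List String :=
  if pool = [] then []
  else
    let n : Int := PySem.List.len pool
    let offset : Int := PySem.Int.mod (pass_index * pass_size) n
    (PySem.List.pyRange 0 (min pass_size n) 1).foldl
      (fun targets i => targets ++ [PySem.List.pyGetD pool (PySem.Int.mod (offset + i) n) ""]) []

-- ===== PORT B =====
def select_pass_targets_alt (pool : List String) (pass_index : Int) (pass_size : Int) : List String :=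
  if pool = [] then []
  else
    let count : Int := min pass_size (PySem.List.len pool)
    if count ≤ 0 then []
    else
      let offset : Int := PySem.Int.mod (pass_index * pass_size) (PySem.List.len pool)
      let first := PySem.List.slice pool (some offset) (some (offset + count))
      if PySem.List.len first < count then
        first ++ PySem.List.slice pool none (some (count - PySem.List.len first))
      else first

-- ===== PRECONDITION & SPEC =====
def Spec_select_pass_targets (pool : List String) (pass_index : Int) (pass_size : Int) (out : List String) : Prop := out = select_pass_targets_alt pool pass_index pass_size
instance (pool : List String) (pass_index : Int) (pass_size : Int) (out : List String) : Decidable (Spec_select_pass_targets pool pass_index pass_size out) := by unfold Spec_select_pass_targets; infer_instance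

-- ===== CLAIM (what is proved, stated in full; the proofs are below) =====
def Claim_equal_select_pass_targets : Prop := ∀ (pool : List String) (pass_index : Int) (pass_size : Int), Dom_select_pass_targets pool pass_index pass_size → Spec_select_pass_targets pool pass_index pass_size (select_pass_targets pool pass_index pass_size)

-- ===== LEMMAS AND PROOFS =====

-- A's loop, written as a map over Nat indices, equals the first `c` elements of the rotated list.
theorem pv_map_mod_eq {α : Type} (pool : List α) (off c : Nat) (d : α)
    (hoff : off < pool.length) (hc : c ≤ pool.length) :
    (List.range c).map (fun k => pool.getD ((off + k) % pool.length) d)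
      = ((pool.drop off ++ pool.take off).take c) := by
  apply List.ext_getElem
  · simp only [List.length_map, List.length_range, List.length_take,
      List.length_append, List.length_drop]
    omega
  · intro i h1 h2
    simp only [List.getElem_map, List.getElem_range, List.getElem_take]
    have hlen : (pool.drop off).length = pool.length - off := by simp
    have hmod : (off + i) % pool.length < pool.length := Nat.mod_lt _ (by omega)
    rw [List.getD_eq_getElem _ _ hmod]
    have hi : i < c := by simpa using h1
    rcases Nat.lt_or_ge i (pool.length - off) with hcase | hcase
    · rw [List.getElem_append_left (by omega)]
      have : (off + i) % pool.length = off + i := Nat.mod_eq_of_lt (by omega)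
      simp [this, List.getElem_drop]
    · rw [List.getElem_append_right (by omega)]
      have h2n : off + i < 2 * pool.length := by omega
      have : (off + i) % pool.length = off + i - pool.length := by
        rw [Nat.mod_eq_sub_mod (by omega), Nat.mod_eq_of_lt (by omega)]
      simp [this, hlen]
      congr 1
      omega

theorem select_pass_targets_eq_aux (pool : List String) (pi ps : Int) :
    select_pass_targets pool pi ps = select_pass_targets_alt pool pi ps := by
  unfold select_pass_targets select_pass_targets_alt
  by_cases hp : pool = []
  · simp [hp]
  · simp only [if_neg hp]
    have hN : 0 < pool.length := List.length_pos_iff.mpr hp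
    simp only [PySem.List.len_eq]
    set n : Int := (pool.length : Int) with hn
    have hnpos : 0 < n := by omega
    set count : Int := min ps n with hcnt
    by_cases hc0 : count ≤ 0
    · rw [if_pos hc0, PySem.List.pyRange_one_eq_nil (by omega)]
      simp
    · rw [if_neg hc0]
      replace hc0 : 0 < count := by omega
      set offset : Int := PySem.Int.mod (pi * ps) n with hoffdef
      have h0 : 0 ≤ offset := PySem.Int.mod_nonneg (pi * ps) hnpos
      have hlt : offset < n := PySem.Int.mod_lt (pi * ps) hnpos
      set off : Nat := offset.toNat with hoffn
      set c : Nat := count.toNat with hcn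
      have hofflt : off < pool.length := by omega
      have hcle : c ≤ pool.length := by omega
      have hcpos : 0 < c := by omega
      have hoffcast : offset = (off : Int) := by omega
      have hccast : count = (c : Int) := by omega
      -- A side
      have hA : (PySem.List.pyRange 0 count 1).foldl
          (fun targets i => targets ++ [PySem.List.pyGetD pool (PySem.Int.mod (offset + i) n) ""]) []
          = (pool.drop off ++ pool.take off).take c := by
        rw [PySem.List.foldl_append_singleton_eq_map, PySem.List.pyRange_one]
        simp only [List.map_map, List.nil_append, sub_zero, hcn]
        rw [← pv_map_mod_eq pool off c "" hofflt hcle]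
        apply List.map_congr_left
        intro k hk
        simp only [Function.comp]
        have he : offset + (0 + (k:Int)) = ((off + k : Nat) : Int) := by push_cast; omega
        rw [he, hn, PySem.Int.mod_natCast, PySem.List.pyGetD_natCast]
      rw [hA]
      -- B side
      have hfirst : PySem.List.slice pool (some offset) (some (offset + count))
          = (pool.drop off).take c := by
        rw [PySem.List.slice_toNat pool h0 (by omega)]
        congr 1
        omega
      rw [hfirst]
      simp only [List.length_take, List.length_drop]
      by_cases hw : c ≤ pool.length - off
      · have hmin : min c (pool.length - off) = c := by omega
        rw [hmin, if_neg (by omega)]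
        rw [List.take_append]
        have : c - (pool.drop off).length = 0 := by simp; omega
        rw [this]
        simp
      · have hmin : min c (pool.length - off) = pool.length - off := by omega
        rw [hmin, if_pos (by omega)]
        have hfull : (pool.drop off).take c = pool.drop off :=
          List.take_of_length_le (by simp; omega)
        rw [hfull, List.take_append]
        have h1 : (pool.drop off).take c = pool.drop off :=hfull
        rw [h1]
        have hcast2 : count - ((pool.length - off : Nat) : Int) = ((c - (pool.length - off) : Nat) : Int) := by omega
        rw [hcast2, PySem.List.slice_to_natCast, List.take_take]
        have hkey : c - (pool.length - off) ≤ off := by omega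
        simp only [List.length_drop]
        rw [Nat.min_eq_left hkey]

-- ===== VERDICT (by name: the statement is the Claim_ definition above) =====
theorem select_pass_targets_spec : Claim_equal_select_pass_targets := by
  intro pool pi ps _
  exact select_pass_targets_eq_aux pool pi ps
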